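-- pv_equiv track=rewrite | github.com/RomanAdamczyk/korepetycje-django-zwyk-e | matematyka/views.py | simplify_square_root
-- ===== SOURCE A (Python) =====
-- def prime_factorization(number):
--     """Returns the prime factorization of a number as a list."""
--     factors = []
--     divisor = 2
--     while number > 1:
--         while number % divisor == 0:
--             factors.append(divisor)
--             number //= divisor
--         divisor += 1
--     return factors
--
-- def simplify_square_root(factor):
--     """Simplifies the square root of a factor."""
--
--     if factor == 0:
--         return "0"
--     elif factor == 1:
--         return "1"
--
--     factors = prime_factorization(factor)
--     unique_factors = set(factors)
--
--     simplified = 1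
--     for f in unique_factors:
--         count = factors.count(f)
--         if count % 2 == 0:
--             simplified *= f ** (count // 2)
--         else:
--             simplified *= f ** ((count - 1) // 2)
--
--     return f"{simplified} * sqrt({factor // (simplified ** 2)})" if simplified != 1 else f"sqrt({factor})"
-- ===== SOURCE B (Python) =====
-- def simplify_square_root(factor):
--     """Simplifies the square root of a factor."""
--     if factor == 0:
--         return "0"
--     elif factor == 1:
--         return "1"
--     n = factor
--     s = 1
--     d = 2
--     while d * d <= n:
--         e = 0
--         while n % d == 0:
--             n //= d
--             e += 1
--         s *= d ** (e // 2)
--         d += 1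
--     return f"{s} * sqrt({factor // (s * s)})" if s != 1 else f"sqrt({factor})"
-- ===== Notes on version B (the rewrite author's own statement) =====
-- stated objective: faster
-- what changed: B replaces A's full prime factorization by trial division over every divisor up to n (plus a set/count post-pass over the factor list) with a single loop that trial-divides only while d*d <= n and accumulates the extracted square part directly; the leftover prime factor contributes nothing to the square part, so it needs no scan.
import Mathlib
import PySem

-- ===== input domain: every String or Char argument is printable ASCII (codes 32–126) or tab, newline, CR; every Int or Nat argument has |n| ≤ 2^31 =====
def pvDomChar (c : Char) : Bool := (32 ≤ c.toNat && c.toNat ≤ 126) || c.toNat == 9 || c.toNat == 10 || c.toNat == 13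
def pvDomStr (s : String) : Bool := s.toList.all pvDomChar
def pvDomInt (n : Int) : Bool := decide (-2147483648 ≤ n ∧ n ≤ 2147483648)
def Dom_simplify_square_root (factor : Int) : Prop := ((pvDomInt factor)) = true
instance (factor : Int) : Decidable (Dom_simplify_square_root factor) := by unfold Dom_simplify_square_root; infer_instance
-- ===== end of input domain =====

-- B replaces A's O(n) trial division over ALL divisors (plus a set/count post-pass) by trial
-- division only while d*d <= n, accumulating the square part directly in one pass.

-- ===== PORT A =====
-- inner `while number % divisor == 0` loop of prime_factorization; the Nat fuel is only a
-- totality guard (number strictly decreases at each division), it does not change the value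
def pfInner (number divisor : Int) (fuel : Nat) : List Int × Int :=
  match fuel with
  | 0 => ([], number)
  | f + 1 =>
    if PySem.Int.mod number divisor == 0 then
      let r := pfInner (PySem.Int.floordiv number divisor) divisor f
      (divisor :: r.1, r.2)
    else ([], number)

-- outer `while number > 1` loop of prime_factorization (fuel = totality guard)
def pfOuter (number divisor : Int) (fuel : Nat) : List Int :=
  match fuel with
  | 0 => []
  | f + 1 =>
    if number > 1 then
      let r := pfInner number divisor number.toNat
      r.1 ++ pfOuter r.2 (divisor + 1) f
    else []

def prime_factorization (number : Int) : List Int :=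
  pfOuter number 2 (number.toNat + 1)

-- body of A's `for f in unique_factors` loop (factors.count(f) is a nonnegative int,
-- so `f ** (count // 2)` is ported with a Nat exponent via .toNat)
def pfStep (factors : List Int) (acc f : Int) : Int :=
  let count : Int := (PySem.List.count factors f : Int)
  if PySem.Int.mod count 2 == 0 then acc * f ^ (PySem.Int.floordiv count 2).toNat
  else acc * f ^ (PySem.Int.floordiv (count - 1) 2).toNat

def simplify_square_root (factor : Int) : String :=
  if factor == 0 then "0"
  else if factor == 1 then "1"
  else
    let factors := prime_factorization factor
    let unique_factors := PySem.Set.ofList factors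
    let simplified := unique_factors.foldl (pfStep factors) 1
    if simplified != 1 then
      PySem.Int.toStr simplified ++ " * sqrt(" ++
        PySem.Int.toStr (PySem.Int.floordiv factor (simplified ^ 2)) ++ ")"
    else "sqrt(" ++ PySem.Int.toStr factor ++ ")"

-- ===== PORT B =====
-- inner `while n % d == 0` loop of B (fuel = totality guard)
def sqInner (n d e : Int) (fuel : Nat) : Int × Int :=
  match fuel with
  | 0 => (n, e)
  | f + 1 =>
    if PySem.Int.mod n d == 0 then sqInner (PySem.Int.floordiv n d) d (e + 1) f
    else (n, e)

-- outer `while d * d <= n` loop of B, accumulating s (fuel = totality guard;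
-- e is a nonnegative count, so `d ** (e // 2)` is ported with a Nat exponent via .toNat)
def sqOuter (n d s : Int) (fuel : Nat) : Int :=
  match fuel with
  | 0 => s
  | f + 1 =>
    if d * d ≤ n then
      let r := sqInner n d 0 n.toNat
      sqOuter r.1 (d + 1) (s * d ^ (PySem.Int.floordiv r.2 2).toNat) f
    else s

def simplify_square_root_alt (factor : Int) : String :=
  if factor == 0 then "0"
  else if factor == 1 then "1"
  else
    let s := sqOuter factor 2 1 (factor.toNat + 1)
    if s != 1 then
      PySem.Int.toStr s ++ " * sqrt(" ++
        PySem.Int.toStr (PySem.Int.floordiv factor (s * s)) ++ ")"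
    else "sqrt(" ++ PySem.Int.toStr factor ++ ")"

-- ===== PRECONDITION & SPEC =====
def Spec_simplify_square_root (factor : Int) (out : String) : Prop := out = simplify_square_root_alt factor
instance (factor : Int) (out : String) : Decidable (Spec_simplify_square_root factor out) := by unfold Spec_simplify_square_root; infer_instance

-- ===== CLAIM (what is proved, stated in full; the proofs are below) =====
def Claim_equal_simplify_square_root : Prop := ∀ (factor : Int), Dom_simplify_square_root factor → Spec_simplify_square_root factor (simplify_square_root factor)

-- ===== LEMMAS AND PROOFS =====

-- A's post-processing of the factor list, as a function of that list
def pfProd (fs : List Int) : Int := (PySem.Set.ofList fs).foldl (pfStep fs) 1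

-- invariant of both outer loops: no divisor of n below the current trial divisor d
def pfInv (n d : Int) : Prop := ∀ k : Int, 2 ≤ k → k < d → ¬ (k ∣ n)

-- every element produced by pfInner's list is the divisor itself
theorem pfInner_mem (fuel : Nat) (n d x : Int) (hx : x ∈ (pfInner n d fuel).1) : x = d := by
  induction fuel generalizing n with
  | zero => simp [pfInner] at hx
  | succ f ih =>
    simp only [pfInner] at hx
    split at hx
    · rcases List.mem_cons.mp hx with h | h
      · exact h
      · exact ih _ h
    · simp at hx

-- every factor produced from trial divisor d on is ≥ d
theorem pfOuter_ge (fuel : Nat) (n d x : Int) (hx : x ∈ pfOuter n d fuel) : d ≤ x := by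
  induction fuel generalizing n d with
  | zero => simp [pfOuter] at hx
  | succ f ih =>
    simp only [pfOuter] at hx
    split at hx
    · rcases List.mem_append.mp hx with h | h
      · exact le_of_eq (pfInner_mem _ _ _ _ h).symm
      · exact le_trans (by omega) (ih _ _ h)
    · simp at hx

-- full spec of the inner stripping loop, given enough fuel
theorem pfInner_spec (fuel : Nat) (n d : Int) (hn : 1 ≤ n) (hd : 2 ≤ d)
    (hfuel : n.toNat ≤ fuel) :
    ∃ e : Nat, ∃ n' : Int, pfInner n d fuel = (List.replicate e d, n') ∧
      n = d ^ e * n' ∧ ¬ (d ∣ n') ∧ 1 ≤ n' := by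
  induction fuel generalizing n with
  | zero => omega
  | succ f ih =>
    by_cases hdvd : d ∣ n
    · have hdpos : (0:Int) < d := by omega
      have hm : d * PySem.Int.floordiv n d = n := by
        rw [PySem.Int.floordiv_eq_ediv_of_pos hdpos]
        exact Int.mul_ediv_cancel' hdvd
      set m := PySem.Int.floordiv n d with hmdef
      have hm1 : 1 ≤ m := by nlinarith
      have hmn : m < n := by nlinarith
      obtain ⟨e, n', heq, hfac, hnd, hn'⟩ := ih m hm1 (by omega)
      refine ⟨e + 1, n', ?_, ?_, hnd, hn'⟩
      · simp only [pfInner]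
        rw [if_pos (by simpa [beq_iff_eq, PySem.Int.mod_eq_zero_iff_dvd] using hdvd)]
        rw [← hmdef, heq, List.replicate_succ]
      · rw [← hm, hfac]; ring
    · refine ⟨0, n, ?_, by ring, hdvd, hn⟩
      simp only [pfInner]
      rw [if_neg (by simpa [beq_iff_eq, PySem.Int.mod_eq_zero_iff_dvd] using hdvd)]
      simp

-- B's inner loop computes the same residue, and counts pfInner's list
theorem sqInner_eq (fuel : Nat) (n d e : Int) :
    sqInner n d e fuel = ((pfInner n d fuel).2, e + ((pfInner n d fuel).1.length : Int)) := by
  induction fuel generalizing n e with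
  | zero => simp [sqInner, pfInner]
  | succ f ih =>
    simp only [sqInner, pfInner]
    split
    · rw [ih]
      simp only [List.length_cons]
      refine Prod.ext rfl ?_
      push_cast; ring
    · simp

-- ===== facts about pfProd =====

theorem pfStep_mul (L : List Int) (acc f : Int) : pfStep L acc f = acc * pfStep L 1 f := by
  simp only [pfStep]
  split <;> ring

theorem foldl_pfStep (L : List Int) (s : List Int) (a : Int) :
    s.foldl (pfStep L) a = a * s.foldl (pfStep L) 1 := by
  induction s generalizing a with
  | nil => simp
  | cons x s ih =>
    simp only [List.foldl_cons]
    rw [ih (pfStep L a x), ih (pfStep L 1 x), pfStep_mul L a x]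
    ring

theorem foldl_add_cons (rest : List Int) (d : Int) (s : List Int)
    (hd : d ∉ rest) :
    List.foldl PySem.Set.add (d :: s) rest = d :: List.foldl PySem.Set.add s rest := by
  induction rest generalizing s with
  | nil => rfl
  | cons x rest ih =>
    have hxd : x ≠ d := fun h => hd (h ▸ List.mem_cons_self ..)
    have hrest : d ∉ rest := fun h => hd (List.mem_cons_of_mem _ h)
    have hadd : PySem.Set.add (d :: s) x = d :: PySem.Set.add s x := by
      have hc : (List.contains (d :: s) x) = (List.contains s x) := by
        simp [hxd]
      simp only [PySem.Set.add, PySem.Set.contains, hc]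
      split <;> simp
    simp only [List.foldl_cons, hadd, ih _ hrest]

theorem ofList_replicate_append (e : Nat) (d : Int) (rest : List Int) (hd : d ∉ rest) :
    PySem.Set.ofList (List.replicate (e + 1) d ++ rest) = d :: PySem.Set.ofList rest := by
  have hrep : ∀ (k : Nat), List.foldl PySem.Set.add [d] (List.replicate k d) = [d] := by
    intro k
    induction k with
    | zero => rfl
    | succ k ih =>
      rw [List.replicate_succ, List.foldl_cons]
      have : PySem.Set.add [d] d = [d] := by
        simp [PySem.Set.add, PySem.Set.contains]
      rw [this, ih]
  rw [PySem.Set.ofList_eq_foldl, PySem.Set.ofList_eq_foldl, List.foldl_append,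
    List.replicate_succ, List.foldl_cons]
  have h1 : PySem.Set.add ([] : List Int) d = [d] := by
    simp [PySem.Set.add, PySem.Set.contains]
  rw [h1, hrep, foldl_add_cons rest d [] hd]

theorem pfStep_head (c : Nat) (d : Int) (hc : 0 < c) :
    (if PySem.Int.mod (c:Int) 2 == 0 then (1:Int) * d ^ (PySem.Int.floordiv (c:Int) 2).toNat
     else 1 * d ^ (PySem.Int.floordiv ((c:Int) - 1) 2).toNat) = d ^ (c / 2) := by
  have hmod : PySem.Int.mod (c : Int) 2 = ((c % 2 : Nat) : Int) := by
    exact_mod_cast PySem.Int.mod_natCast c 2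
  have hdiv : PySem.Int.floordiv (c : Int) 2 = ((c / 2 : Nat) : Int) := by
    exact_mod_cast PySem.Int.floordiv_natCast c 2
  have hdiv' : PySem.Int.floordiv ((c : Int) - 1) 2 = (((c - 1) / 2 : Nat) : Int) := by
    have h : ((c : Int) - 1) = (((c - 1 : Nat)) : Int) := by omega
    rw [h]
    exact_mod_cast PySem.Int.floordiv_natCast (c - 1) 2
  rw [hmod, hdiv, hdiv']
  by_cases hp : c % 2 = 0
  · rw [if_pos (by simp [hp]), Int.toNat_natCast, one_mul]
  · rw [if_neg (by simp; omega), Int.toNat_natCast, one_mul]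
    congr 1
    omega

theorem pfProd_replicate_append (e : Nat) (d : Int) (rest : List Int) (hd : d ∉ rest) :
    pfProd (List.replicate e d ++ rest) = d ^ (e / 2) * pfProd rest := by
  cases e with
  | zero => simp
  | succ e' =>
    have hof := ofList_replicate_append e' d rest hd
    have hcd : (PySem.List.count (List.replicate (e' + 1) d ++ rest) d : Int)
        = ((e' + 1 : Nat) : Int) := by
      simp [PySem.List.count_eq, List.count_append, List.count_eq_zero.mpr hd]
    have hcx : ∀ x : Int, x ≠ d →
        PySem.List.count (List.replicate (e' + 1) d ++ rest) x = PySem.List.count rest x := by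
      intro x hx
      simp [PySem.List.count_eq, List.count_append, List.count_replicate, Ne.symm hx]
    have hstep : ∀ (acc : Int), ∀ x ∈ PySem.Set.ofList rest,
        pfStep (List.replicate (e' + 1) d ++ rest) acc x = pfStep rest acc x := by
      intro acc x hxmem
      have hx : x ≠ d := fun h => hd (h ▸ (PySem.Set.mem_ofList rest x).mp hxmem)
      simp only [pfStep, hcx x hx]
    have hfirst : pfStep (List.replicate (e' + 1) d ++ rest) 1 d = d ^ ((e' + 1) / 2) := by
      simp only [pfStep, hcd]
      exact pfStep_head (e' + 1) d (by omega)
    calc pfProd (List.replicate (e' + 1) d ++ rest)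
        = (PySem.Set.ofList rest).foldl (pfStep (List.replicate (e' + 1) d ++ rest))
            (pfStep (List.replicate (e' + 1) d ++ rest) 1 d) := by
          rw [pfProd, hof, List.foldl_cons]
      _ = (PySem.Set.ofList rest).foldl (pfStep rest)
            (pfStep (List.replicate (e' + 1) d ++ rest) 1 d) :=
          PySem.List.foldl_congr_mem _ _ _ _ hstep
      _ = d ^ ((e' + 1) / 2) * pfProd rest := by
          rw [foldl_pfStep, hfirst, pfProd]

theorem pfProd_nil : pfProd [] = 1 := rfl

theorem pfProd_singleton (n : Int) : pfProd [n] = 1 := by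
  have hof : PySem.Set.ofList [n] = [n] := by
    simp [PySem.Set.ofList_eq_foldl, PySem.Set.add, PySem.Set.contains]
  have hcount : (PySem.List.count [n] n : Int) = 1 := by
    simp [PySem.List.count_eq]
  simp only [pfProd, hof, List.foldl_cons, List.foldl_nil, pfStep, hcount]
  rw [if_neg (by decide)]
  norm_num

-- the inner loop does nothing when d does not divide n
theorem pfInner_not_dvd (fuel : Nat) (n d : Int) (h : ¬ d ∣ n) : pfInner n d fuel = ([], n) := by
  cases fuel with
  | zero => rfl
  | succ f =>
    simp only [pfInner]
    rw [if_neg (by simpa [beq_iff_eq, PySem.Int.mod_eq_zero_iff_dvd] using h)]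

-- the outer loop does nothing once number ≤ 1
theorem pfOuter_le_one (fuel : Nat) (n d : Int) (h : ¬ n > 1) : pfOuter n d fuel = [] := by
  cases fuel with
  | zero => rfl
  | succ f =>
    simp only [pfOuter]
    rw [if_neg h]

-- tail phase: once d * d > n and n has no divisor below d, A's remaining loop yields [n]
theorem pfOuter_tail (fuel : Nat) (n d : Int) (hn : 1 < n) (hd : 2 ≤ d)
    (hdd : n < d * d) (hinv : pfInv n d) (hfuel : n + 1 ≤ d + fuel) :
    pfOuter n d fuel = [n] := by
  induction fuel generalizing d with
  | zero =>
    exact absurd dvd_rfl (hinv n (by omega) (by omega))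
  | succ f ih =>
    have hdn : d ≤ n := by
      by_contra hlt
      exact hinv n (by omega) (by omega) dvd_rfl
    simp only [pfOuter]
    rw [if_pos hn]
    rcases lt_or_eq_of_le hdn with hlt | heqd
    · have hndvd : ¬ d ∣ n := by
        rintro ⟨m, hm⟩
        have hm1 : 1 ≤ m := by nlinarith
        have hmne : m ≠ 1 := by
          intro h1
          rw [h1, mul_one] at hm
          omega
        have hmd : m < d := by nlinarith
        exact hinv m (by omega) hmd ⟨d, by rw [hm]; ring⟩
      rw [pfInner_not_dvd _ _ _ hndvd]
      simp only [List.nil_append]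
      refine ih (d + 1) (by omega) (by nlinarith) ?_ (by omega)
      intro k hk2 hkd hkdvd
      rcases (by omega : k < d ∨ k = d) with h | h
      · exact hinv k hk2 h hkdvd
      · exact hndvd (h ▸ hkdvd)
    · obtain ⟨e, n', heq, hfac, hnd, hn'⟩ := pfInner_spec n.toNat n d (by omega) hd le_rfl
      have he : e = 1 := by
        match e, heq, hfac with
        | 0, heq, hfac =>
          rw [pow_zero, one_mul] at hfac
          refine absurd (show d ∣ n' by rw [← hfac, heqd]) hnd
        | 1, heq, hfac => rfl
        | (e2 + 2), heq, hfac =>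
          exfalso
          have hp : d ^ 2 ≤ d ^ (e2 + 2) := pow_le_pow_right₀ (by omega) (by omega)
          nlinarith
      subst he
      rw [pow_one] at hfac
      have hn1 : n' = 1 := by nlinarith
      rw [heq, hn1]
      rw [pfOuter_le_one _ _ _ (by omega)]
      rw [heqd]
      simp

-- lockstep: A's factors (post-processed) against B's running square part
theorem lockstep (fuelB : Nat) (fuelA : Nat) (n d s : Int) (hn : 1 ≤ n) (hd : 2 ≤ d)
    (hinv : pfInv n d) (hB : n + 2 ≤ d + fuelB) (hA : n + 2 ≤ d + fuelA) :
    s * pfProd (pfOuter n d fuelA) = sqOuter n d s fuelB := by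
  induction fuelB generalizing fuelA n d s with
  | zero =>
    have hn1 : n = 1 := by
      by_contra h
      exact hinv n (by omega) (by omega) dvd_rfl
    subst hn1
    rw [pfOuter_le_one _ _ _ (by omega), pfProd_nil, mul_one]
    rfl
  | succ f ih =>
    simp only [sqOuter]
    by_cases hcond : d * d ≤ n
    · rw [if_pos hcond]
      have hdn : d ≤ n := by nlinarith
      have hn2 : 1 < n := by omega
      cases fuelA with
      | zero => omega
      | succ fA =>
        obtain ⟨e, n', heq, hfac, hnd, hn'⟩ := pfInner_spec n.toNat n d (by omega) hd le_rfl
        have hn'le : n' ≤ n := by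
          have hdvd : n' ∣ n := ⟨d ^ e, by rw [hfac]; ring⟩
          exact Int.le_of_dvd (by omega) hdvd
        simp only [pfOuter]
        rw [if_pos hn2, sqInner_eq, heq]
        simp only [List.length_replicate]
        have hexp : (PySem.Int.floordiv (0 + (e : Int)) 2).toNat = e / 2 := by
          rw [zero_add,
            show PySem.Int.floordiv (e : Int) 2 = ((e / 2 : Nat) : Int) from by
              exact_mod_cast PySem.Int.floordiv_natCast e 2]
          exact Int.toNat_natCast _
        rw [hexp]
        have hnotin : d ∉ pfOuter n' (d + 1) fA := fun hmem => by
          have := pfOuter_ge fA n' (d + 1) d hmem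
          omega
        rw [pfProd_replicate_append e d _ hnotin]
        have hinv' : pfInv n' (d + 1) := by
          intro k hk2 hkd hkdvd
          rcases (by omega : k < d ∨ k = d) with h | h
          · exact hinv k hk2 h (hkdvd.trans ⟨d ^ e, by rw [hfac]; ring⟩)
          · exact hnd (h ▸ hkdvd)
        rw [← ih fA n' (d + 1) (s * d ^ (e / 2)) hn' (by omega) hinv' (by omega) (by omega)]
        ring
    · rw [if_neg hcond]
      rcases (by omega : n = 1 ∨ 1 < n) with h1 | h1
      · subst h1
        rw [pfOuter_le_one _ _ _ (by omega), pfProd_nil, mul_one]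
      · rw [pfOuter_tail fuelA n d h1 hd (by omega) hinv (by omega), pfProd_singleton,
          mul_one]

-- A's body, with the three lets folded into pfProd (definitional)
theorem simplify_eq (factor : Int) (h0 : factor ≠ 0) (h1 : factor ≠ 1) :
    simplify_square_root factor =
      (if pfProd (prime_factorization factor) != 1 then
        PySem.Int.toStr (pfProd (prime_factorization factor)) ++ " * sqrt(" ++
          PySem.Int.toStr (PySem.Int.floordiv factor (pfProd (prime_factorization factor) ^ 2))
          ++ ")"
      else "sqrt(" ++ PySem.Int.toStr factor ++ ")") := by
  simp only [simplify_square_root]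
  rw [if_neg (by simpa using h0), if_neg (by simpa using h1)]
  rfl

-- B's body, with the let folded (definitional)
theorem alt_eq (factor : Int) (h0 : factor ≠ 0) (h1 : factor ≠ 1) :
    simplify_square_root_alt factor =
      (if sqOuter factor 2 1 (factor.toNat + 1) != 1 then
        PySem.Int.toStr (sqOuter factor 2 1 (factor.toNat + 1)) ++ " * sqrt(" ++
          PySem.Int.toStr (PySem.Int.floordiv factor
            (sqOuter factor 2 1 (factor.toNat + 1) * sqOuter factor 2 1 (factor.toNat + 1)))
          ++ ")"
      else "sqrt(" ++ PySem.Int.toStr factor ++ ")") := by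
  simp only [simplify_square_root_alt]
  rw [if_neg (by simpa using h0), if_neg (by simpa using h1)]

-- ===== VERDICT (by name: the statement is the Claim_ definition above) =====
theorem simplify_square_root_spec : Claim_equal_simplify_square_root := by
  unfold Claim_equal_simplify_square_root
  intro factor _
  unfold Spec_simplify_square_root
  by_cases h0 : factor = 0
  · subst h0; rfl
  by_cases h1 : factor = 1
  · subst h1; rfl
  have key : pfProd (prime_factorization factor) = sqOuter factor 2 1 (factor.toNat + 1) := by
    rcases (by omega : factor ≤ -1 ∨ 2 ≤ factor) with hneg | hpos
    · rw [prime_factorization, pfOuter_le_one _ _ _ (by omega), pfProd_nil,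
        show factor.toNat + 1 = 1 from by omega]
      simp only [sqOuter]
      rw [if_neg (by omega)]
    · rw [prime_factorization,
        ← lockstep (factor.toNat + 1) (factor.toNat + 1) factor 2 1 (by omega) le_rfl
          (fun k hk2 hkd => absurd hkd (by omega)) (by omega) (by omega), one_mul]
  rw [simplify_eq factor h0 h1, alt_eq factor h0 h1, key, pow_two]
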